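-- pv_equiv track=rewrite | github.com/tabas015/Introduction-to-Computing-and-Programming-Concepts | python hw5/hw5.py | wizards
-- ===== SOURCE A (Python) =====
-- def wizards(grades, life, sleep):
--     my_list = []
--     i = 0
--     while i < len(grades):
--         j = 0
--         while j < len(life):
--             if grades[i] == life[j]:
--                 k = 0
--                 while k < len(sleep):
--                     if grades[i] == life[j] == sleep[k]:
--                          my_list.append(grades[i])
--
--                     k +=1
--             j +=1
--         i +=1
--
--     return my_list
-- ===== SOURCE B (Python) =====
-- def wizards(grades, life, sleep):
--     life_count = {}
--     for v in life:
--         life_count[v] = life_count.get(v, 0) + 1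
--     sleep_count = {}
--     for v in sleep:
--         sleep_count[v] = sleep_count.get(v, 0) + 1
--     out = []
--     for g in grades:
--         out.extend([g] * (life_count.get(g, 0) * sleep_count.get(g, 0)))
--     return out
-- ===== Notes on version B (the rewrite author's own statement) =====
-- stated objective: faster
-- what changed: Replaces the triple nested scan with two count dictionaries built once over life and sleep, then a single pass over grades appending each value count_life*count_sleep times.
import Mathlib
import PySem

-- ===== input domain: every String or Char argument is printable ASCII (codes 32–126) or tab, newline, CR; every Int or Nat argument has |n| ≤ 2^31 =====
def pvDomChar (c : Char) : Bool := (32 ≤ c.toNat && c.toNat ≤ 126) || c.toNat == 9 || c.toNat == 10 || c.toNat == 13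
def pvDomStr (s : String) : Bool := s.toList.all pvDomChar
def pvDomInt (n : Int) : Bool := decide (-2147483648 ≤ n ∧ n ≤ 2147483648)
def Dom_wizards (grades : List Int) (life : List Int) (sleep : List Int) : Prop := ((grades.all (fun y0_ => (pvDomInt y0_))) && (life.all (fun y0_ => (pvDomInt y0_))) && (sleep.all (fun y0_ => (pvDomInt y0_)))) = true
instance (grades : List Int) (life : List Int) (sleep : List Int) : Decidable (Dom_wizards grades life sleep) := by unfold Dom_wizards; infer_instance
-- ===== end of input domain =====

-- B replaces A's triple nested scan by two count dictionaries and one pass over grades (asymptotically faster in a timing run).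

-- ===== PORT A =====
-- A walks grades, for each matching life entry walks sleep and appends the grade on every triple match.
def wizards (grades : List Int) (life : List Int) (sleep : List Int) : List Int :=
  grades.foldl (fun acc g =>
    life.foldl (fun acc l =>
      if g == l then
        sleep.foldl (fun acc s => if g == l && l == s then acc ++ [g] else acc) acc
      else acc) acc) []

-- ===== PORT B =====
-- B: build count dicts of life and sleep, then one pass over grades extending by [g] * (cl * cs).
def wizards_alt (grades : List Int) (life : List Int) (sleep : List Int) : List Int :=
  let lifeCount := life.foldl (fun d v => d.insert v (d.getD v 0 + 1)) (PySem.Dict.empty : PySem.Dict Int Int)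
  let sleepCount := sleep.foldl (fun d v => d.insert v (d.getD v 0 + 1)) (PySem.Dict.empty : PySem.Dict Int Int)
  grades.foldl (fun out g =>
    out ++ List.replicate ((lifeCount.getD g 0 * sleepCount.getD g 0)).toNat g) []

-- ===== PRECONDITION & SPEC =====
def Spec_wizards (grades : List Int) (life : List Int) (sleep : List Int) (out : List Int) : Prop := out = wizards_alt grades life sleep
instance (grades : List Int) (life : List Int) (sleep : List Int) (out : List Int) : Decidable (Spec_wizards grades life sleep out) := by unfold Spec_wizards; infer_instance

-- ===== CLAIM (what is proved, stated in full; the proofs are below) =====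
def Claim_equal_wizards : Prop := ∀ (grades : List Int) (life : List Int) (sleep : List Int), Dom_wizards grades life sleep → Spec_wizards grades life sleep (wizards grades life sleep)

-- ===== LEMMAS AND PROOFS =====

-- generic: a fold appending [g] whenever p holds appends g countP p times.
theorem pv_append_loop (g : Int) (p : Int → Bool) (xs : List Int) (acc : List Int) :
    xs.foldl (fun acc s => if p s then acc ++ [g] else acc) acc
      = acc ++ List.replicate (xs.countP p) g := by
  induction xs generalizing acc with
  | nil => simp
  | cons x rest ih =>
    rw [List.foldl_cons, List.countP_cons]
    by_cases h : p x
    · rw [if_pos h, ih, h, List.append_assoc]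
      simp [List.replicate_succ]
    · rw [if_neg h, ih]
      simp [h]

-- A's middle life loop appends g (count life g * count sleep g) times.
theorem pv_life_loop (g : Int) (life sleep : List Int) (acc : List Int) :
    life.foldl (fun acc l =>
      if g == l then
        sleep.foldl (fun acc s => if g == l && l == s then acc ++ [g] else acc) acc
      else acc) acc
      = acc ++ List.replicate (life.count g * sleep.count g) g := by
  induction life generalizing acc with
  | nil => simp
  | cons l rest ih =>
    rw [List.foldl_cons, List.count_cons]
    by_cases h : g = l
    · rw [if_pos (by simp [h]), pv_append_loop, ih]
      have hc : (sleep.countP fun s => g == l && l == s) = sleep.count g := by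
        subst h
        simp only [beq_self_eq_true, Bool.true_and]
        refine List.countP_congr (fun a _ => ?_)
        by_cases hga : g = a
        · simp [hga]
        · simp [hga, Ne.symm hga]
      rw [hc]
      have hm : (List.count g rest + if l == g then 1 else 0) * List.count g sleep
          = List.count g sleep + List.count g rest * List.count g sleep := by
        subst h
        simp only [beq_self_eq_true, if_true]
        ring
      rw [hm, List.replicate_add, List.append_assoc]
    · rw [if_neg (by simp [h]), ih]
      have : (if l == g then 1 else 0) = 0 := by simp [Ne.symm h]
      rw [this, Nat.add_zero]

theorem pv_getD_count (xs : List Int) (v : Int) :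
    (xs.foldl (fun d x => d.insert x (d.getD x 0 + 1)) (PySem.Dict.empty : PySem.Dict Int Int)).getD v 0
      = (xs.count v : Int) := by
  rw [PySem.Dict.foldl_insert_getD_add_one_eq_counter, PySem.Dict.getD_counter]

-- ===== VERDICT (by name: the statement is the Claim_ definition above) =====
theorem wizards_spec : Claim_equal_wizards := by
  intro grades life sleep hD
  clear hD
  unfold Spec_wizards wizards wizards_alt
  induction grades using List.reverseRecOn with
  | nil => simp
  | append_singleton gs g ih =>
    simp only [List.foldl_append, List.foldl_cons, List.foldl_nil]
    rw [ih, pv_life_loop, pv_getD_count, pv_getD_count, ← Nat.cast_mul, Int.toNat_natCast]
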